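-- pv_equiv track=rewrite | github.com/JosephJonathanFernandes/AI-Search-Codes | 8puzzle_Hill2.py | solvable
-- ===== SOURCE A (Python) =====
-- def solvable(state):
--     puzzle=[x for x in state if x!=0]
--     inversions=0
--     n=len(puzzle)
--     for i in range(n):
--         for j in range(i+1,n):
--             if puzzle[i]>puzzle[j]:
--                 inversions+=1
--     return inversions % 2==0
-- ===== SOURCE B (Python) =====
-- def solvable(state):
--     puzzle = [x for x in state if x != 0]
--
--     def merge_count(left, right):
--         merged = []
--         inv = 0
--         i, j = 0, 0
--         while i < len(left) and j < len(right):
--             if left[i] <= right[j]: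
--                 merged.append(left[i])
--                 i += 1
--             else:
--                 inv += len(left) - i
--                 merged.append(right[j])
--                 j += 1
--         merged += left[i:]
--         merged += right[j:]
--         return merged, inv
--
--     def sort_count(a):
--         if len(a) < 2:
--             return a, 0
--         mid = len(a) // 2
--         left, linv = sort_count(a[:mid])
--         right, rinv = sort_count(a[mid:])
--         merged, minv = merge_count(left, right)
--         return merged, linv + rinv + minv
--
--     return sort_count(puzzle)[1] % 2 == 0
-- ===== Notes on version B (the rewrite author's own statement) =====
-- stated objective: faster
-- what changed: Replaces the O(n^2) nested-loop pair scan with merge-sort inversion counting (divide, sort-and-count, merge counting cross inversions), then takes the parity.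
import Mathlib
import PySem

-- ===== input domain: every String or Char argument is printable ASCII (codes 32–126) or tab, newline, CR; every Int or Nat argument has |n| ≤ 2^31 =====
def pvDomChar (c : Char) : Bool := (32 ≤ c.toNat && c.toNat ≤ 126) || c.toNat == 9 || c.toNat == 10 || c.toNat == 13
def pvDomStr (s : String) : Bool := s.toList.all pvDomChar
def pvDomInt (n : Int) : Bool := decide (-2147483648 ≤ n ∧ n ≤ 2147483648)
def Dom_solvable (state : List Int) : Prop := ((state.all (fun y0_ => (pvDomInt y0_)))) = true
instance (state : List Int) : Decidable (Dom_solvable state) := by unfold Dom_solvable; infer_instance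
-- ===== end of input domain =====

-- B replaces A's O(n^2) nested-loop pair scan with merge-sort inversion counting (objective: faster).

-- ===== PORT A =====
def solvable (state : List Int) : Bool :=
  let puzzle := state.filter (fun x => x != 0)
  let n : Int := puzzle.length
  let inversions : Int :=
    (PySem.List.pyRange 0 n 1).foldl
      (fun acc i =>
        (PySem.List.pyRange (i + 1) n 1).foldl
          (fun acc2 j =>
            if PySem.List.pyGetD puzzle j 0 < PySem.List.pyGetD puzzle i 0 then acc2 + 1 else acc2)
          acc)
      0
  PySem.Int.mod inversions 2 == 0

-- ===== PORT B =====
-- merge_count's index loop is transcribed with the unconsumed suffixes of left/right as the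
-- state; the fuel argument is only a totality guard (it is always large enough).
def mergeCount : Nat → List Int → List Int → List Int × Nat
  | 0, xs, ys => (xs ++ ys, 0)
  | _ + 1, [], ys => (ys, 0)
  | _ + 1, x :: xs, [] => (x :: xs, 0)
  | fuel + 1, x :: xs, y :: ys =>
    if x ≤ y then
      let r := mergeCount fuel xs (y :: ys)
      (x :: r.1, r.2)
    else
      let r := mergeCount fuel (x :: xs) ys
      (y :: r.1, r.2 + (x :: xs).length)

def sortCount : Nat → List Int → List Int × Nat
  | 0, l => (l, 0)
  | fuel + 1, l =>
    if l.length < 2 then (l, 0)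
    else
      let mid := l.length / 2
      let L := sortCount fuel (l.take mid)
      let R := sortCount fuel (l.drop mid)
      let M := mergeCount (L.1.length + R.1.length) L.1 R.1
      (M.1, L.2 + R.2 + M.2)

def solvable_alt (state : List Int) : Bool :=
  let puzzle := state.filter (fun x => x != 0)
  (sortCount puzzle.length puzzle).2 % 2 == 0

-- ===== PRECONDITION & SPEC =====
def Spec_solvable (state : List Int) (out : Bool) : Prop := out = solvable_alt state
instance (state : List Int) (out : Bool) : Decidable (Spec_solvable state out) := by unfold Spec_solvable; infer_instance

-- ===== CLAIM (what is proved, stated in full; the proofs are below) =====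
def Claim_equal_solvable : Prop := ∀ (state : List Int), Dom_solvable state → Spec_solvable state (solvable state)

-- ===== LEMMAS AND PROOFS =====

/-- Number of inversions (pairs earlier > later), structurally. -/
def invCount : List Int → Nat
  | [] => 0
  | x :: xs => xs.countP (fun z => z < x) + invCount xs

/-- Number of cross pairs (x from `xs`, z from `ys`) with z < x. -/
def crossCount (xs ys : List Int) : Nat :=
  (xs.map (fun x => ys.countP (fun z => z < x))).sum

theorem invCount_append (l₁ l₂ : List Int) :
    invCount (l₁ ++ l₂) = invCount l₁ + invCount l₂ + crossCount l₁ l₂ := by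
  induction l₁ with
  | nil => simp [invCount, crossCount]
  | cons x t ih => simp [invCount, crossCount, List.countP_append, ih]; omega

theorem crossCount_perm_left {xs xs' : List Int} (h : xs.Perm xs') (ys : List Int) :
    crossCount xs ys = crossCount xs' ys :=
  List.Perm.sum_eq (h.map _)

theorem crossCount_perm_right (xs : List Int) {ys ys' : List Int} (h : ys.Perm ys') :
    crossCount xs ys = crossCount xs ys' := by
  unfold crossCount
  congr 1
  exact List.map_congr_left (fun x _ => h.countP_eq _)

theorem crossCount_nil_right (xs : List Int) : crossCount xs [] = 0 := by
  induction xs with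
  | nil => rfl
  | cons x t ih => simp_all [crossCount]

theorem crossCount_cons_right (xs : List Int) (y : Int) (ys : List Int) :
    crossCount xs (y :: ys) = xs.countP (fun t => y < t) + crossCount xs ys := by
  induction xs with
  | nil => rfl
  | cons x t ih =>
    simp [crossCount, List.countP_cons] at ih ⊢
    rw [ih]
    by_cases h : y < x <;> simp [h] <;> try omega

theorem mergeCount_spec (fuel : Nat) :
    ∀ xs ys : List Int, xs.length + ys.length ≤ fuel →
      xs.Pairwise (· ≤ ·) → ys.Pairwise (· ≤ ·) →
      (mergeCount fuel xs ys).1.Perm (xs ++ ys) ∧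
      (mergeCount fuel xs ys).1.Pairwise (· ≤ ·) ∧
      (mergeCount fuel xs ys).2 = crossCount xs ys := by
  induction fuel with
  | zero =>
    intro xs ys h hx hy
    have : xs = [] := by cases xs <;> simp_all
    subst this
    simp_all [mergeCount, crossCount]
  | succ fuel ih =>
    intro xs ys h hx hy
    match xs, ys with
    | [], ys => simp [mergeCount, crossCount]; exact hy
    | x :: xs, [] =>
      simp [mergeCount, crossCount_nil_right]
      exact List.pairwise_cons.mp hx
    | x :: xs, y :: ys =>
      rw [List.pairwise_cons] at hx hy
      by_cases hxy : x ≤ y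
      · have hrec := ih xs (y :: ys) (by simp only [List.length_cons] at h ⊢; omega) hx.2
          (List.pairwise_cons.mpr hy)
        simp only [mergeCount, hxy, if_pos]
        refine ⟨?_, ?_, ?_⟩
        · exact (hrec.1.cons x)
        · refine List.pairwise_cons.mpr ⟨?_, hrec.2.1⟩
          intro z hz
          have hz' := hrec.1.mem_iff.mp hz
          simp at hz'
          rcases hz' with h1 | h2 | h3
          · exact hx.1 z h1
          · omega
          · exact le_trans hxy (hy.1 z h3)
        · rw [hrec.2.2]
          have hc : (y :: ys).countP (fun z => z < x) = 0 := by
            rw [List.countP_eq_zero]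
            intro z hz
            simp at hz ⊢
            rcases hz with rfl | hz
            · omega
            · have := hy.1 z hz; omega
          show crossCount xs (y :: ys) = crossCount (x :: xs) (y :: ys)
          simp only [crossCount, List.map_cons, List.sum_cons]
          rw [hc]
          omega
      · have hrec := ih (x :: xs) ys (by simp only [List.length_cons] at h ⊢; omega)
          (List.pairwise_cons.mpr hx) hy.2
        simp only [mergeCount, hxy, if_false]
        refine ⟨?_, ?_, ?_⟩
        · exact (hrec.1.cons y).trans List.perm_middle.symm
        · refine List.pairwise_cons.mpr ⟨?_, hrec.2.1⟩
          intro z hz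
          have hz' := hrec.1.mem_iff.mp hz
          simp at hz'
          rcases hz' with rfl | h1 | h3
          · omega
          · have := hx.1 z h1; omega
          · exact hy.1 z h3
        · rw [hrec.2.2, crossCount_cons_right]
          have : (x :: xs).countP (fun t => y < t) = (x :: xs).length := by
            rw [List.countP_eq_length]
            intro z hz
            simp at hz ⊢
            rcases hz with rfl | hz
            · omega
            · have := hx.1 z hz; omega
          omega

theorem invCount_small (l : List Int) (h : l.length < 2) : invCount l = 0 := by
  match l, h with
  | [], _ => rfl
  | [x], _ => simp [invCount]

theorem sortCount_spec (fuel : Nat) : ∀ l : List Int, l.length ≤ fuel →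
    (sortCount fuel l).1.Perm l ∧ (sortCount fuel l).1.Pairwise (· ≤ ·) ∧
    (sortCount fuel l).2 = invCount l := by
  induction fuel with
  | zero =>
    intro l h
    have : l = [] := by cases l <;> simp_all
    subst this
    simp [sortCount, invCount]
  | succ fuel ih =>
    intro l h
    by_cases hl : l.length < 2
    · simp only [sortCount, if_pos hl]
      refine ⟨List.Perm.refl l, ?_, (invCount_small l hl).symm⟩
      match l, hl with
      | [], _ => simp
      | [x], _ => simp
    · have h2 : 2 ≤ l.length := by omega
      have hmid1 : 1 ≤ l.length / 2 := by omega
      have hmid2 : l.length / 2 < l.length := by omega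
      obtain ⟨pL, sL, cL⟩ := ih (l.take (l.length / 2)) (by simp; omega)
      obtain ⟨pR, sR, cR⟩ := ih (l.drop (l.length / 2)) (by simp; omega)
      obtain ⟨pM, sM, cM⟩ := mergeCount_spec
        ((sortCount fuel (l.take (l.length / 2))).1.length +
         (sortCount fuel (l.drop (l.length / 2))).1.length)
        (sortCount fuel (l.take (l.length / 2))).1
        (sortCount fuel (l.drop (l.length / 2))).1 (le_refl _) sL sR
      simp only [sortCount, if_neg hl]
      refine ⟨?_, sM, ?_⟩
      · have hpp := pL.append pR
        rw [List.take_append_drop] at hpp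
        exact pM.trans hpp
      · rw [cM, cL, cR]
        rw [crossCount_perm_left pL, crossCount_perm_right _ pR]
        have hsplit := invCount_append (l.take (l.length / 2)) (l.drop (l.length / 2))
        rw [List.take_append_drop] at hsplit
        omega

theorem A_outer (puzzle : List Int) :
    ∀ (d k : Nat) (a : Int), puzzle.length - k = d → k ≤ puzzle.length →
      (PySem.List.pyRange (k : Int) (puzzle.length : Int) 1).foldl
        (fun acc i =>
          (PySem.List.pyRange (i + 1) (puzzle.length : Int) 1).foldl
            (fun acc2 j =>
              if PySem.List.pyGetD puzzle j 0 < PySem.List.pyGetD puzzle i 0 then acc2 + 1 else acc2)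
            acc)
        a
      = a + (invCount (puzzle.drop k) : Int) := by
  intro d
  induction d with
  | zero =>
    intro k a hd hk
    have hke : k = puzzle.length := by omega
    rw [PySem.List.pyRange_one_eq_nil (by exact_mod_cast hke.ge)]
    simp [hke, List.drop_length, invCount]
  | succ d ihd =>
    intro k a hd hk
    have hklt : k < puzzle.length := by omega
    rw [PySem.List.pyRange_one_cons (by exact_mod_cast hklt)]
    rw [List.foldl_cons]
    have hcast : (k : Int) + 1 = ((k + 1 : Nat) : Int) := by push_cast; ring
    rw [hcast]
    rw [PySem.List.foldl_pyRange_pyGetD' puzzle 0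
      (fun acc2 v => if v < PySem.List.pyGetD puzzle (k : Int) 0 then acc2 + 1 else acc2) a
      (by positivity)]
    rw [PySem.List.foldl_ite_add_one (fun v => v < PySem.List.pyGetD puzzle (k : Int) 0)]
    rw [ihd (k + 1) _ (by omega) (by omega)]
    have hdk : puzzle.drop k = puzzle[k] :: puzzle.drop (k + 1) := List.drop_eq_getElem_cons hklt
    rw [hdk]
    have hg : PySem.List.pyGetD puzzle (k : Int) 0 = puzzle[k] := by
      rw [PySem.List.pyGetD_natCast, List.getD_eq_getElem _ _ hklt]
    simp only [invCount, Int.toNat_natCast, hg]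
    push_cast
    ring

-- ===== VERDICT (by name: the statement is the Claim_ definition above) =====
theorem solvable_spec : Claim_equal_solvable := by
  unfold Claim_equal_solvable Spec_solvable
  intro state _
  show solvable state = solvable_alt state
  unfold solvable solvable_alt
  have hA := A_outer (state.filter (fun x => x != 0))
    (state.filter (fun x => x != 0)).length 0 0 (by omega) (by omega)
  have hB := (sortCount_spec (state.filter (fun x => x != 0)).length
    (state.filter (fun x => x != 0)) (le_refl _)).2.2
  simp only [Nat.cast_zero] at hA
  simp only [hA, hB]
  rw [PySem.Int.mod_eq_emod_of_pos (by norm_num)]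
  rw [Bool.eq_iff_iff]
  simp only [beq_iff_eq, List.drop_zero, zero_add]
  omega
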